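-- pv_equiv track=rewrite | github.com/sugar-activities/4460-activity | soko.py | blanks2minus
-- ===== SOURCE A (Python) =====
-- def blanks2minus(line0,cols):
--     line=''; just_copy=False
--     for ch in line0:
--         if ch!=' ': just_copy=True
--         if just_copy: line+=ch
--         else: line+='-'
--     ln=cols-len(line0); line+=ln*'-'
--     return line
-- ===== SOURCE B (Python) =====
-- def blanks2minus(line0, cols):
--     n = len(line0) - len(line0.lstrip(' '))
--     return '-' * n + line0[n:] + '-' * (cols - len(line0))
-- ===== Notes on version B (the rewrite author's own statement) =====
-- stated objective: idiomatic
-- what changed: B computes the leading-space count up front and builds the result as one concatenation of a dash prefix, the untouched suffix and the padding, instead of A's per-character loop with a copy flag and repeated string appends.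
import Mathlib
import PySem

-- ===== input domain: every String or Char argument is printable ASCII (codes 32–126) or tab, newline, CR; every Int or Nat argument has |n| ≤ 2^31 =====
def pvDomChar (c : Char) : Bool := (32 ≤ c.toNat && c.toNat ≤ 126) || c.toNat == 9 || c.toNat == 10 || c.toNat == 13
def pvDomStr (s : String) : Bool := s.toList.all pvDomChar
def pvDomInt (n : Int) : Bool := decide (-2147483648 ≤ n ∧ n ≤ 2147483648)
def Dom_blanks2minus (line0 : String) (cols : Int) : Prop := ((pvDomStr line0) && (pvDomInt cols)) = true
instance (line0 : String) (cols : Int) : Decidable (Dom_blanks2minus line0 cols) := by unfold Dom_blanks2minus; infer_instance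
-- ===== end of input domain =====

-- B replaces A's per-character loop with flag by a split point computed up front and one concatenation (idiomatic).

-- ===== PORT A =====
-- one loop step: 'if ch!=' ': just_copy=True; if just_copy: line+=ch else: line+='-''
def blanks2minusStep (st : List Char × Bool) (ch : Char) : List Char × Bool :=
  let jc := if ch ≠ ' ' then true else st.2
  if jc then (st.1 ++ [ch], jc) else (st.1 ++ ['-'], jc)

def blanks2minus (line0 : String) (cols : Int) : String :=
  let st := line0.toList.foldl blanks2minusStep ([], false)
  let ln := cols - (line0.toList.length : Int)
  String.ofList (st.1 ++ PySem.List.pyRepeat ['-'] ln)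

-- ===== PORT B =====
def blanks2minus_alt (line0 : String) (cols : Int) : String :=
  let cs := line0.toList
  -- line0.lstrip(' ') is exactly dropping the leading space characters
  let n : Int := (cs.length : Int) - ((cs.dropWhile (· == ' ')).length : Int)
  String.ofList (PySem.List.pyRepeat ['-'] n ++ PySem.List.slice cs (some n) none
             ++ PySem.List.pyRepeat ['-'] (cols - (cs.length : Int)))

-- ===== PRECONDITION & SPEC =====
def Spec_blanks2minus (line0 : String) (cols : Int) (out : String) : Prop := out = blanks2minus_alt line0 cols
instance (line0 : String) (cols : Int) (out : String) : Decidable (Spec_blanks2minus line0 cols out) := by unfold Spec_blanks2minus; infer_instance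

-- ===== CLAIM (what is proved, stated in full; the proofs are below) =====
def Claim_equal_blanks2minus : Prop := ∀ (line0 : String) (cols : Int), Dom_blanks2minus line0 cols → Spec_blanks2minus line0 cols (blanks2minus line0 cols)

-- ===== LEMMAS AND PROOFS =====

-- once the flag is true, the loop just copies the rest
theorem foldl_step_true (cs : List Char) (acc : List Char) :
    cs.foldl blanks2minusStep (acc, true) = (acc ++ cs, true) := by
  induction cs generalizing acc with
  | nil => simp
  | cons c cs ih => simp [blanks2minusStep, ih]

-- with the flag false, the loop emits one dash per leading space, then copies from the first non-space
theorem foldl_step_false (cs : List Char) (acc : List Char) :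
    (cs.foldl blanks2minusStep (acc, false)).1
      = acc ++ List.replicate (cs.takeWhile (· == ' ')).length '-' ++ cs.dropWhile (· == ' ') := by
  induction cs generalizing acc with
  | nil => simp
  | cons c cs ih =>
    by_cases h : c = ' '
    · subst h
      simp only [List.foldl_cons, blanks2minusStep, ne_eq, not_true_eq_false,
        if_neg (by simp : ¬False)]
      simp [ih, List.replicate_succ]
    · simp only [List.foldl_cons, blanks2minusStep, ne_eq, h, not_false_eq_true,
        if_pos trivial]
      rw [foldl_step_true]
      simp [h]

theorem dropWhile_len_le (cs : List Char) :
    (cs.dropWhile (· == ' ')).length ≤ cs.length :=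
  List.length_dropWhile_le _ _

-- ===== VERDICT (by name: the statement is the Claim_ definition above) =====
theorem blanks2minus_spec : Claim_equal_blanks2minus := by
  intro line0 cols _
  unfold Spec_blanks2minus blanks2minus blanks2minus_alt
  set cs := line0.toList with hcs
  have hle := dropWhile_len_le cs
  have hn : ((cs.length : Int) - ((cs.dropWhile (· == ' ')).length : Int))
      = ((cs.takeWhile (· == ' ')).length : Int) := by
    have h2 : (cs.takeWhile (· == ' ')).length + (cs.dropWhile (· == ' ')).length
        = cs.length := by
      rw [← List.length_append, List.takeWhile_append_dropWhile]
    omega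
  have hd : List.drop (cs.takeWhile (· == ' ')).length cs = cs.dropWhile (· == ' ') := by
    nth_rewrite 2 [← List.takeWhile_append_dropWhile (p := (· == ' ')) (l := cs)]
    exact List.drop_left
  dsimp only
  rw [foldl_step_false]
  congr 1
  rw [hn, PySem.List.slice_from_natCast]
  simp [PySem.List.pyRepeat_singleton, hd]
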